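-- pv_equiv track=rewrite | github.com/sarinstein-yan/KnottedGraph | src/knotted_graph/yamada/planar_diagram.py | _cyclically_equivalent
-- ===== SOURCE A (Python) =====
-- from typing import Dict, List, Tuple
--
-- def _cyclically_equivalent(target: List[int], current: List[int]) -> bool:
--     """Return True if ``current`` is a cyclic rotation of ``target``."""
--
--     if len(target) != len(current):
--         return False
--     if not target:
--         return True
--     n = len(target)
--     doubled = current * 2
--     for i in range(n):
--         if doubled[i : i + n] == target:
--             return True
--     return False
-- ===== SOURCE B (Python) =====
-- def _cyclically_equivalent(target, current):
--     """Return True if ``current`` is a cyclic rotation of ``target``."""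
--     if len(target) != len(current):
--         return False
--     if not target:
--         return True
--     n = len(target)
--
--     def step(q, x):
--         # KMP automaton: longest prefix of target that stays matched after reading x
--         while q > 0 and target[q] != x:
--             q = fail[q - 1]
--         if target[q] == x:
--             q += 1
--         return q
--
--     # failure table: fail[i] = length of the longest proper border of target[:i+1]
--     fail = [0]
--     k = 0
--     for x in target[1:]:
--         k = step(k, x)
--         fail.append(k)
--
--     # run the automaton over current + current; a full match <=> current is a rotation
--     q = 0
--     for x in current + current:
--         q = step(q, x)
--         if q == n:
--             return True
--     return False
-- ===== Notes on version B (the rewrite author's own statement) =====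
-- stated objective: faster
-- what changed: Replaces A's scan that compares an n-element window of the doubled list at every offset with Knuth-Morris-Pratt: B precomputes the failure table of target and streams once over current+current in O(n) automaton steps, instead of A's O(n^2) worst-case slice comparisons.
import Mathlib
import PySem

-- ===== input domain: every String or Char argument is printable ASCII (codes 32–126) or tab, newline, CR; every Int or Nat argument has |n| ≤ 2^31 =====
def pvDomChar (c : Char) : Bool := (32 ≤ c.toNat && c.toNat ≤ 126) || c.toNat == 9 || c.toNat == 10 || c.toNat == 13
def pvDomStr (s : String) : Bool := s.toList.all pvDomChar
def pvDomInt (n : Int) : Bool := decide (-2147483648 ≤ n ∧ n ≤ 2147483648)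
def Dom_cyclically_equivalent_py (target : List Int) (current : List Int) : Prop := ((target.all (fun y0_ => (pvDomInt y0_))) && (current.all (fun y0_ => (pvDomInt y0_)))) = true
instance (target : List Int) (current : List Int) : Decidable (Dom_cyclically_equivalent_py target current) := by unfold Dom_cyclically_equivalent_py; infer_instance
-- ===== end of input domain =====

-- B replaces A's rotation-by-rotation window scan with a KMP automaton run over current + current
-- (failure table + single streaming pass): O(n) matching instead of O(n^2) worst-case (measured faster).


-- ===== PORT A =====
-- the `for i in range(n): if doubled[i:i+n] == target: return True` loop
def pvAGo (target doubled : List Int) (n : Int) : List Int → Bool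
  | [] => false
  | i :: rest =>
      if PySem.List.slice doubled (some i) (some (i + n)) = target then true
      else pvAGo target doubled n rest

def cyclically_equivalent_py (target : List Int) (current : List Int) : Bool :=
  if target.length ≠ current.length then false
  else if target = [] then true
  else
    let n : Int := (target.length : Int)
    let doubled := current ++ current
    pvAGo target doubled n (PySem.List.pyRange 0 n 1)

-- ===== PORT B =====
-- Source B's `step`: `while q > 0 and target[q] != x: q = fail[q-1]; if target[q] == x: q += 1`.
-- The while loop is ported with fuel = the entering q: each iteration replaces q by fail[q-1] < q
-- (proved below for the tables Source B builds), so the fuel is never exhausted on Source B's runs.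
-- `target[q]` is ported as getD: every reachable access has 0 ≤ q < len(target) (established by the proofs below).
def pvStepF (p : List Int) (fail : List Nat) (x : Int) : Nat → Nat → Nat
  | 0, q =>
      if q ≠ 0 ∧ p.getD q 0 ≠ x then q  -- fuel exhausted: unreachable on Source B's runs
      else if p.getD q 0 = x then q + 1 else q
  | fuel + 1, q =>
      if q ≠ 0 ∧ p.getD q 0 ≠ x then pvStepF p fail x fuel (fail.getD (q - 1) 0)
      else if p.getD q 0 = x then q + 1 else q

-- the table-building loop: `for x in target[1:]: k = step(k, x); fail.append(k)`
def pvBuild (p : List Int) : List Int → List Nat → Nat → List Nat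
  | [], fail, _ => fail
  | x :: rest, fail, k =>
      let k' := pvStepF p fail x k k
      pvBuild p rest (fail ++ [k']) k'

-- the matching loop: `for x in current + current: q = step(q, x); if q == n: return True`
def pvScan (p : List Int) (fail : List Nat) (n : Nat) : Nat → List Int → Bool
  | _, [] => false
  | q, x :: rest =>
      let q' := pvStepF p fail x q q
      if q' = n then true else pvScan p fail n q' rest

def cyclically_equivalent_py_alt (target : List Int) (current : List Int) : Bool :=
  if target.length ≠ current.length then false
  else if target = [] then true
  else pvScan target (pvBuild target (target.drop 1) [0] 0) target.length 0 (current ++ current)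

-- ===== PRECONDITION & SPEC =====
def Spec_cyclically_equivalent_py (target : List Int) (current : List Int) (out : Bool) : Prop := out = cyclically_equivalent_py_alt target current
instance (target : List Int) (current : List Int) (out : Bool) : Decidable (Spec_cyclically_equivalent_py target current out) := by unfold Spec_cyclically_equivalent_py; infer_instance

-- ===== CLAIM (what is proved, stated in full; the proofs are below) =====
def Claim_equal_cyclically_equivalent_py : Prop := ∀ (target : List Int) (current : List Int), Dom_cyclically_equivalent_py target current → Spec_cyclically_equivalent_py target current (cyclically_equivalent_py target current)

-- ===== LEMMAS AND PROOFS =====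

-- `pvM p t` = the length of the longest prefix of p that is a suffix of t (the KMP match state)
-- `pvB p q` = the length of the longest proper border of p.take q (the failure-table spec)
def pvM (p t : List Int) : Nat := Nat.findGreatest (fun k => p.take k <:+ t) p.length
def pvB (p : List Int) (q : Nat) : Nat := Nat.findGreatest (fun b => b < q ∧ p.take b <:+ p.take q) p.length

theorem pvM_suffix (p t : List Int) : p.take (pvM p t) <:+ t := by
  unfold pvM
  rcases Nat.eq_zero_or_pos (Nat.findGreatest (fun k => p.take k <:+ t) p.length) with h | h
  · rw [h]; exact List.nil_suffix
  · have := (Nat.findGreatest_eq_iff.1 (rfl : Nat.findGreatest (fun k => p.take k <:+ t) p.length = _)).2.1 (by omega)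
    exact this

theorem pvM_le (p t : List Int) : pvM p t ≤ p.length := Nat.findGreatest_le _

theorem pvM_le_length (p t : List Int) : pvM p t ≤ t.length := by
  rcases Nat.eq_zero_or_pos (pvM p t) with h | h
  · omega
  · have hs : p.take (pvM p t) <:+ t := pvM_suffix p t
    have := hs.length_le
    have hle : pvM p t ≤ p.length := Nat.findGreatest_le _
    simpa [List.length_take, Nat.min_eq_left hle] using this

theorem le_pvM (p t : List Int) {k : Nat} (hk : k ≤ p.length) (h : p.take k <:+ t) : k ≤ pvM p t :=
  Nat.le_findGreatest hk h

theorem pvM_eq_length_iff (p t : List Int) : pvM p t = p.length ↔ p <:+ t := by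
  constructor
  · intro h
    have := pvM_suffix p t
    rwa [h, List.take_length] at this
  · intro h
    have := le_pvM p t le_rfl (by rwa [List.take_length])
    have h2 : pvM p t ≤ p.length := Nat.findGreatest_le _
    omega

theorem pvB_lt (p : List Int) {q : Nat} (hq : 1 ≤ q) : pvB p q < q := by
  unfold pvB
  rcases Nat.eq_zero_or_pos (Nat.findGreatest (fun b => b < q ∧ p.take b <:+ p.take q) p.length) with h | h
  · omega
  · exact ((Nat.findGreatest_eq_iff.1 (rfl : Nat.findGreatest (fun b => b < q ∧ p.take b <:+ p.take q) p.length = _)).2.1 (by omega)).1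

theorem pvB_suffix (p : List Int) (q : Nat) : p.take (pvB p q) <:+ p.take q := by
  unfold pvB
  rcases Nat.eq_zero_or_pos (Nat.findGreatest (fun b => b < q ∧ p.take b <:+ p.take q) p.length) with h | h
  · rw [h]; exact List.nil_suffix
  · exact ((Nat.findGreatest_eq_iff.1 (rfl : Nat.findGreatest (fun b => b < q ∧ p.take b <:+ p.take q) p.length = _)).2.1 (by omega)).2

theorem suffix_concat_singleton_iff (l t : List Int) (a x : Int) :
    l ++ [a] <:+ t ++ [x] ↔ a = x ∧ l <:+ t := by
  rw [← List.reverse_prefix]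
  simp only [List.reverse_append, List.reverse_singleton, List.singleton_append]
  rw [List.cons_prefix_cons, List.reverse_prefix]

theorem take_succ_eq (p : List Int) {k : Nat} (hk : k < p.length) :
    p.take (k + 1) = p.take k ++ [p.getD k 0] := by
  rw [List.take_add_one]
  simp [List.getElem?_eq_getElem hk, List.getD_eq_getElem?_getD]

theorem take_suffix_concat_iff (p t : List Int) (x : Int) {k : Nat} (h1 : 1 ≤ k) (h2 : k ≤ p.length) :
    p.take k <:+ t ++ [x] ↔ p.take (k - 1) <:+ t ∧ p.getD (k - 1) 0 = x := by
  obtain ⟨k, rfl⟩ : ∃ m, k = m + 1 := ⟨k - 1, by omega⟩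
  rw [take_succ_eq p (by omega), suffix_concat_singleton_iff]
  simp [and_comm]

theorem take_suffix_take (p t : List Int) {k q : Nat} (hkq : k ≤ q) (hq : q ≤ p.length)
    (h1 : p.take k <:+ t) (h2 : p.take q <:+ t) : p.take k <:+ p.take q :=
  List.suffix_of_suffix_length_le h1 h2 (by simp [List.length_take]; omega)

theorem findGreatest_congr' (P Q : Nat → Prop) [DecidablePred P] [DecidablePred Q] :
    ∀ n, (∀ k, k ≤ n → (P k ↔ Q k)) → Nat.findGreatest P n = Nat.findGreatest Q n := by
  intro n
  induction n with
  | zero => intro; rfl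
  | succ n ih =>
      intro h
      rw [Nat.findGreatest_succ, Nat.findGreatest_succ]
      by_cases hp : P (n + 1)
      · rw [if_pos hp, if_pos ((h _ le_rfl).1 hp)]
      · rw [if_neg hp, if_neg (fun hq => hp ((h _ le_rfl).2 hq)), ih (fun k hk => h k (by omega))]

theorem pvB_eq_pvM (p : List Int) {q : Nat} (h1 : 1 ≤ q) (hq : q ≤ p.length) :
    pvB p q = pvM p ((p.take q).drop 1) := by
  unfold pvB pvM
  apply findGreatest_congr'
  intro b hb
  have hlen : ((p.take q).drop 1).length = q - 1 := by simp [List.length_take]; omega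
  constructor
  · rintro ⟨hbq, hsuf⟩
    refine List.suffix_of_suffix_length_le hsuf (List.drop_suffix _ _) ?_
    simp [List.length_take]; omega
  · intro hsuf
    have h2 : p.take b <:+ p.take q := hsuf.trans (List.drop_suffix _ _)
    have h3 := hsuf.length_le
    rw [hlen] at h3
    simp only [List.length_take] at h3
    exact ⟨by omega, h2⟩

theorem pvB_one (p : List Int) : pvB p 1 = 0 := by
  unfold pvB
  rw [Nat.findGreatest_eq_zero_iff]
  intro n hn _ h
  omega


theorem pvStepF_spec (p t : List Int) (x : Int) :
    ∀ q (fail : List Nat) (fuel : Nat), q ≤ fuel → q < p.length →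
      (∀ j, j < q → fail.getD j 0 = pvB p (j + 1)) →
      p.take q <:+ t →
      (∀ k, k ≤ p.length → 1 ≤ k → p.take k <:+ t ++ [x] → k ≤ q + 1) →
      pvStepF p fail x fuel q = pvM p (t ++ [x]) := by
  intro q
  induction q using Nat.strong_induction_on with
  | _ q ih =>
    intro fail fuel hfuel hqn hfail ht hmax
    by_cases hcond : q ≠ 0 ∧ p.getD q 0 ≠ x
    · -- mismatch: follow the failure link
      obtain ⟨f, rfl⟩ : ∃ f, fuel = f + 1 := ⟨fuel - 1, by omega⟩
      have hq1 : 1 ≤ q := by omega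
      rw [pvStepF, if_pos hcond]
      have hfq : fail.getD (q - 1) 0 = pvB p q := by
        have := hfail (q - 1) (by omega)
        rwa [Nat.sub_add_cancel hq1] at this
      rw [hfq]
      have hlt : pvB p q < q := pvB_lt p hq1
      apply ih (pvB p q) hlt fail f (by omega) (by omega)
      · intro j hj; exact hfail j (by omega)
      · exact (pvB_suffix p q).trans ht
      · intro k hk hk1 hsuf
        have hkq1 := hmax k hk hk1 hsuf
        have hd := (take_suffix_concat_iff p t x hk1 hk).1 hsuf
        -- k ≠ q + 1 because p[q] ≠ x
        have hkq : k ≤ q := by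
          rcases Nat.lt_or_ge k (q + 1) with h | h
          · omega
          · exfalso
            have : k = q + 1 := by omega
            subst this
            simp only [Nat.add_sub_cancel] at hd
            exact hcond.2 hd.2
        -- k - 1 is a border of p.take q, hence ≤ pvB p q
        have hb : p.take (k - 1) <:+ p.take q := take_suffix_take p t (by omega) (by omega) hd.1 ht
        have := Nat.le_findGreatest (P := fun b => b < q ∧ p.take b <:+ p.take q) (m := k - 1) (n := p.length) (by omega) ⟨by omega, hb⟩
        unfold pvB at *
        omega
    · have hor := not_and_or.mp hcond
      have hstep : pvStepF p fail x fuel q = if p.getD q 0 = x then q + 1 else q := by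
        cases fuel with
        | zero => rw [pvStepF, if_neg hcond]
        | succ f => rw [pvStepF, if_neg hcond]
      rw [hstep]
      by_cases hx : p.getD q 0 = x
      · rw [if_pos hx]
        symm
        unfold pvM
        rw [Nat.findGreatest_eq_iff]
        refine ⟨by omega, ?_, ?_⟩
        · intro _
          exact (take_suffix_concat_iff p t x (by omega) (by omega)).2 (by simpa using ⟨ht, hx⟩)
        · intro k hk1 hk2 hsuf
          have := hmax k hk2 (by omega) hsuf
          omega
      · rw [if_neg hx]
        have hq0 : q = 0 := by
          rcases hor with h | h
          · omega
          · exact absurd (not_not.mp h) hx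
        subst hq0
        symm
        unfold pvM
        rw [Nat.findGreatest_eq_zero_iff]
        intro k hk1 hk2 hsuf
        have := hmax k hk2 (by omega) hsuf
        have : k = 1 := by omega
        subst this
        have hd := (take_suffix_concat_iff p t x (by omega) (by omega)).1 hsuf
        simpa using hx hd.2



theorem getD_table (p : List Int) (i j : Nat) (hj : j < i) :
    ((List.range i).map (fun j => pvB p (j + 1))).getD j 0 = pvB p (j + 1) := by
  rw [List.getD_eq_getElem?_getD, List.getElem?_map, List.getElem?_range hj]
  rfl

theorem pvBuild_spec (p : List Int) :
    ∀ (rest : List Int) (i : Nat), 1 ≤ i → i ≤ p.length → rest = p.drop i →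
      pvBuild p rest ((List.range i).map (fun j => pvB p (j + 1))) (pvB p i)
        = (List.range p.length).map (fun j => pvB p (j + 1)) := by
  intro rest
  induction rest with
  | nil =>
      intro i h1 h2 h3
      have : p.length ≤ i := List.drop_eq_nil_iff.mp h3.symm
      have : i = p.length := by omega
      subst this
      rfl
  | cons x rest ih =>
      intro i h1 h2 h3
      have hi : i < p.length := by
        by_contra h
        have : p.drop i = [] := List.drop_eq_nil_iff.mpr (by omega)
        rw [this] at h3; exact List.cons_ne_nil _ _ h3
      have hx : x = p.getD i 0 ∧ rest = p.drop (i + 1) := by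
        rw [List.drop_eq_getElem_cons hi] at h3
        constructor
        · simp [List.getD_eq_getElem?_getD, List.getElem?_eq_getElem hi]
          exact (List.cons_eq_cons.mp h3).1
        · exact (List.cons_eq_cons.mp h3).2
      obtain ⟨hx1, hx2⟩ := hx
      rw [pvBuild]
      -- the step computes pvB p (i+1)
      have hstep : pvStepF p ((List.range i).map (fun j => pvB p (j + 1))) x (pvB p i) (pvB p i)
          = pvB p (i + 1) := by
        have htq : pvB p i = pvM p ((p.take i).drop 1) := pvB_eq_pvM p h1 (by omega)
        set t := (p.take i).drop 1 with hT
        have htlen : t.length = i - 1 := by simp [hT, List.length_take]; omega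
        have htx : t ++ [x] = (p.take (i + 1)).drop 1 := by
          rw [take_succ_eq p hi, List.drop_append_of_le_length (by simp [List.length_take]; omega), hx1]
        rw [htq]
        rw [pvStepF_spec p t x (pvM p t) _ _ le_rfl ?_ ?_ ?_ ?_]
        · rw [htx, ← pvB_eq_pvM p (by omega) (by omega)]
        · have := pvM_le_length p t; omega
        · intro j hj
          have : pvM p t ≤ t.length := pvM_le_length p t
          exact getD_table p i j (by omega)
        · exact pvM_suffix p t
        · intro k hk hk1 hsuf
          have hd := (take_suffix_concat_iff p t x hk1 hk).1 hsuf
          have := le_pvM p t (k := k - 1) (by omega) hd.1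
          omega
      rw [hstep]
      have : ((List.range i).map (fun j => pvB p (j + 1))) ++ [pvB p (i + 1)]
          = (List.range (i + 1)).map (fun j => pvB p (j + 1)) := by
        rw [List.range_succ, List.map_append]
        rfl
      rw [this]
      exact ih (i + 1) (by omega) (by omega) hx2

theorem infix_iff_suffix_prefix (p t : List Int) : p <:+: t ↔ ∃ u, u <+: t ∧ p <:+ u := by
  constructor
  · rintro ⟨s, e, rfl⟩
    exact ⟨s ++ p, ⟨e, by simp⟩, ⟨s, rfl⟩⟩
  · rintro ⟨u, hu, hp⟩
    exact hp.isInfix.trans hu.isInfix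

theorem not_infix_concat (p t : List Int) (x : Int) (h1 : ¬ p <:+: t) (h2 : ¬ p <:+ t ++ [x]) :
    ¬ p <:+: t ++ [x] := by
  intro h
  obtain ⟨u, hu, hp⟩ := (infix_iff_suffix_prefix p (t ++ [x])).1 h
  rcases List.prefix_concat_iff.1 hu with rfl | hu'
  · exact h2 hp
  · exact h1 ((infix_iff_suffix_prefix p t).2 ⟨u, hu', hp⟩)

theorem pvScan_spec (p : List Int) (fail : List Nat) (hp : p ≠ [])
    (hfail : ∀ j, j + 1 < p.length → fail.getD j 0 = pvB p (j + 1)) :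
    ∀ (rest t : List Int), ¬ p <:+: t →
      pvScan p fail p.length (pvM p t) rest = decide (p <:+: (t ++ rest)) := by
  intro rest
  induction rest with
  | nil =>
      intro t hinf
      simp [pvScan, hinf]
  | cons x rs ih =>
      intro t hinf
      have hqn : pvM p t < p.length := by
        have hle := pvM_le p t
        rcases Nat.lt_or_ge (pvM p t) p.length with h | h
        · exact h
        · exfalso
          have : pvM p t = p.length := by omega
          exact hinf ((pvM_eq_length_iff p t).1 this).isInfix
      have hstep : pvStepF p fail x (pvM p t) (pvM p t) = pvM p (t ++ [x]) := by
        apply pvStepF_spec p t x (pvM p t) fail (pvM p t) le_rfl hqn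
        · intro j hj; exact hfail j (by omega)
        · exact pvM_suffix p t
        · intro k hk hk1 hsuf
          have hd := (take_suffix_concat_iff p t x hk1 hk).1 hsuf
          have := le_pvM p t (k := k - 1) (by omega) hd.1
          omega
      rw [pvScan]
      simp only [hstep]
      by_cases hq : pvM p (t ++ [x]) = p.length
      · rw [if_pos hq]
        have hsuf : p <:+ t ++ [x] := (pvM_eq_length_iff p (t ++ [x])).1 hq
        have : p <:+: t ++ x :: rs := by
          have : t ++ x :: rs = (t ++ [x]) ++ rs := by simp
          rw [this]
          exact (infix_iff_suffix_prefix p _).2 ⟨t ++ [x], ⟨rs, rfl⟩, hsuf⟩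
        simp [this]
      · rw [if_neg hq]
        have hni : ¬ p <:+: t ++ [x] :=
          not_infix_concat p t x hinf (fun h => hq ((pvM_eq_length_iff p _).2 h))
        rw [ih (t ++ [x]) hni]
        congr 1
        simp

theorem pvM_nil (p : List Int) (hp : p ≠ []) : pvM p [] = 0 := by
  unfold pvM
  rw [Nat.findGreatest_eq_zero_iff]
  intro k hk1 hk2 hsuf
  have h0 := List.suffix_nil.mp hsuf
  have h1 : (p.take k).length = 0 := by rw [h0]; rfl
  rw [List.length_take] at h1
  omega

theorem alt_char (p c : List Int) (hlen : p.length = c.length) (hp : p ≠ []) :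
    cyclically_equivalent_py_alt p c = decide (p <:+: (c ++ c)) := by
  have hn : 1 ≤ p.length := by
    cases p with
    | nil => exact absurd rfl hp
    | cons a l => simp
  unfold cyclically_equivalent_py_alt
  rw [if_neg (by omega), if_neg hp]
  have htbl : pvBuild p (p.drop 1) [0] 0 = (List.range p.length).map (fun j => pvB p (j + 1)) := by
    have h1 : (List.range 1).map (fun j => pvB p (j + 1)) = [0] := by
      simp [List.range_one, pvB_one]
    have := pvBuild_spec p (p.drop 1) 1 le_rfl hn rfl
    rwa [h1, pvB_one] at this
  rw [htbl]
  have h0 : (0 : Nat) = pvM p [] := (pvM_nil p hp).symm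
  rw [h0, pvScan_spec p _ hp (fun j hj => getD_table p p.length j (by omega)) (c ++ c) []
    (by intro h; exact hp (List.eq_nil_of_infix_nil h))]
  simp

-- A's early-return loop is an `any`
theorem pvAGo_eq_any (target doubled : List Int) (n : Int) (l : List Int) :
    pvAGo target doubled n l
      = l.any (fun i => decide (PySem.List.slice doubled (some i) (some (i + n)) = target)) := by
  induction l with
  | nil => rfl
  | cons i rest ih => simp [pvAGo, ih]

-- the window A compares at offset k of the doubled list is the rotation of current at k
theorem slice_doubled_eq_rot (c : List Int) (k : Nat) (hk : k ≤ c.length) :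
    PySem.List.slice (c ++ c) (some (k : Int)) (some ((k : Int) + (c.length : Int)))
      = c.drop k ++ c.take k := by
  rw [PySem.List.slice_natCast_add, List.drop_append_of_le_length hk, List.take_append,
    List.take_of_length_le (by simp), List.length_drop]
  congr 2
  omega

theorem a_char (p c : List Int) (hlen : p.length = c.length) (hp : p ≠ []) :
    cyclically_equivalent_py p c
      = decide (∃ k : Nat, k < c.length ∧ p = c.drop k ++ c.take k) := by
  unfold cyclically_equivalent_py
  rw [if_neg (by omega), if_neg hp, pvAGo_eq_any]
  rw [Bool.eq_iff_iff]
  simp only [List.any_eq_true, decide_eq_true_eq]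
  constructor
  · rintro ⟨i, hi, heq⟩
    rw [PySem.List.mem_pyRange_one] at hi
    obtain ⟨k, rfl⟩ : ∃ k : Nat, i = (k : Int) := ⟨i.toNat, by omega⟩
    have hk : k < c.length := by rw [← hlen]; exact_mod_cast hi.2
    rw [hlen, slice_doubled_eq_rot c k hk.le] at heq
    exact ⟨k, hk, heq.symm⟩
  · rintro ⟨k, hk, heq⟩
    refine ⟨(k : Int), ?_, ?_⟩
    · rw [PySem.List.mem_pyRange_one]
      exact ⟨Int.natCast_nonneg k, by rw [hlen]; exact_mod_cast hk⟩
    · rw [hlen, slice_doubled_eq_rot c k hk.le]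
      exact heq.symm

theorem rot_iff_infix (p c : List Int) (hlen : p.length = c.length) (hp : p ≠ []) :
    (∃ k : Nat, k < c.length ∧ p = c.drop k ++ c.take k) ↔ p <:+: (c ++ c) := by
  constructor
  · rintro ⟨k, hk, rfl⟩
    refine ⟨c.take k, c.drop k, ?_⟩
    conv_rhs => rw [← List.take_append_drop k c]
    simp only [List.append_assoc]
  · rintro ⟨s, e, hse⟩
    have hlc : p.length + (s.length + e.length) = c.length + c.length := by
      have := congrArg List.length hse
      simp only [List.append_assoc, List.length_append] at this
      omega
    have hs : s.length ≤ c.length := by omega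
    have hps : p = ((c ++ c).drop s.length).take p.length := by
      rw [← hse, List.drop_append_of_le_length (by simp)]
      simp
    rw [List.drop_append_of_le_length hs, List.take_append,
      List.take_of_length_le (by simp; omega), List.length_drop] at hps
    by_cases hkc : s.length < c.length
    · exact ⟨s.length, hkc, by rw [hps]; congr 1; congr 1; omega⟩
    · have hsl : s.length = c.length := by omega
      refine ⟨0, by rw [← hlen]; cases p with | nil => exact absurd rfl hp | cons a l => simp, ?_⟩
      rw [hps, hsl]
      simp [hlen]

theorem main_eq (target current : List Int) :
    cyclically_equivalent_py target current = cyclically_equivalent_py_alt target current := by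
  by_cases hlen : target.length = current.length
  · by_cases hp : target = []
    · subst hp
      unfold cyclically_equivalent_py cyclically_equivalent_py_alt
      simp at hlen
      simp [← hlen]
    · rw [a_char target current hlen hp, alt_char target current hlen hp,
        decide_eq_decide.mpr (rot_iff_infix target current hlen hp)]
  · unfold cyclically_equivalent_py cyclically_equivalent_py_alt
    rw [if_pos hlen, if_pos hlen]

-- ===== VERDICT (by name: the statement is the Claim_ definition above) =====
theorem cyclically_equivalent_py_spec : Claim_equal_cyclically_equivalent_py := by
  intro target current _
  exact main_eq target current
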